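-- pv_equiv track=rewrite | github.com/Nicol1921/pythonBasico | python/ajedrez.py | generar_posiciones
-- ===== SOURCE A (Python) =====
-- def generar_posiciones(posicion, movimientos, num_movimientos):
--     if num_movimientos == 0:
--         return [posicion]
--
--     posiciones = []
--     for movimiento in movimientos:
--         dx, dy = movimiento
--         x, y = posicion
--         nueva_posicion = (x + dx, y + dy)
--
--         if 0 <= nueva_posicion[0] < 8 and 0 <= nueva_posicion[1] < 8:
--             posiciones.extend(generar_posiciones(nueva_posicion, movimientos, num_movimientos - 1))
--
--     return posiciones
-- ===== SOURCE B (Python) =====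
-- def generar_posiciones(posicion, movimientos, num_movimientos):
--     frontera = [posicion]
--     n = num_movimientos
--     while n > 0 and frontera:
--         siguiente = []
--         for (x, y) in frontera:
--             for (dx, dy) in movimientos:
--                 nueva = (x + dx, y + dy)
--                 if 0 <= nueva[0] < 8 and 0 <= nueva[1] < 8:
--                     siguiente.append(nueva)
--         frontera = siguiente
--         n -= 1
--     return frontera
-- ===== Notes on version B (the rewrite author's own statement) =====
-- stated objective: alternative
-- what changed: Replaces the depth-first recursion by an iterative breadth-first frontier: one level-expansion loop repeated num_movimientos times, no recursion.
-- outside the precondition, e.g. on generar_posiciones((0, 0), [], -1): A returns [], B returns [(0, 0)]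
import Mathlib
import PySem

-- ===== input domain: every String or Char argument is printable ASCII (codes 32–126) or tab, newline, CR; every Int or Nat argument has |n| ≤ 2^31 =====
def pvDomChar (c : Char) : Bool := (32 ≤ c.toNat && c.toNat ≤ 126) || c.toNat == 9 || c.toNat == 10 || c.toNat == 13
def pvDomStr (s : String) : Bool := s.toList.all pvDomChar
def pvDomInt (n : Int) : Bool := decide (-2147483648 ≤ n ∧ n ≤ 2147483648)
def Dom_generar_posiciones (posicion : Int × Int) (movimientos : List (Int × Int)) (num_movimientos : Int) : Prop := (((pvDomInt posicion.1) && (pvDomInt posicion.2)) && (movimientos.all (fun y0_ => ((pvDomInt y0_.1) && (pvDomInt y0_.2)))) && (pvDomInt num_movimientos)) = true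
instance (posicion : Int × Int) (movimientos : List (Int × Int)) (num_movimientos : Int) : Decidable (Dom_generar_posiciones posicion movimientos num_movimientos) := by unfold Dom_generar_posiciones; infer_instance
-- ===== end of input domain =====

-- B replaces A's depth-first recursion by an iterative frontier expanded one level per step (alternative decomposition; same return value).
-- ===== PORT A =====
-- recursion on num_movimientos, done via its Nat value (Pre_ restricts to num_movimientos ≥ 0, where this coincides with Python's recursion)
def pvGenA (movimientos : List (Int × Int)) : (Int × Int) → Nat → List (Int × Int)
  | posicion, 0 => [posicion]
  | posicion, Nat.succ k =>
    movimientos.foldl (fun posiciones movimiento =>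
      let nueva : Int × Int := (posicion.1 + movimiento.1, posicion.2 + movimiento.2)
      if 0 ≤ nueva.1 ∧ nueva.1 < 8 ∧ 0 ≤ nueva.2 ∧ nueva.2 < 8 then
        posiciones ++ pvGenA movimientos nueva k
      else posiciones) []

def generar_posiciones (posicion : Int × Int) (movimientos : List (Int × Int)) (num_movimientos : Int) : List (Int × Int) :=
  if num_movimientos = 0 then [posicion]
  else pvGenA movimientos posicion num_movimientos.toNat

-- ===== PORT B =====
-- one level expansion of the frontier (the two inner loops of Source B)
def pvStepB (movimientos : List (Int × Int)) (frontera : List (Int × Int)) : List (Int × Int) :=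
  frontera.foldl (fun siguiente p =>
    movimientos.foldl (fun sig m =>
      let nueva : Int × Int := (p.1 + m.1, p.2 + m.2)
      if 0 ≤ nueva.1 ∧ nueva.1 < 8 ∧ 0 ≤ nueva.2 ∧ nueva.2 < 8 then
        sig ++ [nueva]
      else sig) siguiente) []

-- Source B's 'while n > 0 and frontera' loop: the positive counter n is the structural fuel
def pvLoopB (movimientos : List (Int × Int)) : List (Int × Int) → Nat → List (Int × Int)
  | frontera, 0 => frontera
  | frontera, Nat.succ k =>
    if frontera = [] then frontera
    else pvLoopB movimientos (pvStepB movimientos frontera) k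

def generar_posiciones_alt (posicion : Int × Int) (movimientos : List (Int × Int)) (num_movimientos : Int) : List (Int × Int) :=
  pvLoopB movimientos [posicion] num_movimientos.toNat

-- ===== PRECONDITION & SPEC =====
-- Pre_ excludes negative num_movimientos: there A recurses with no base case, so it diverges (RecursionError)
-- on most inputs and otherwise returns an accidental [] once every move chain has left the board.
def Pre_generar_posiciones (posicion : Int × Int) (movimientos : List (Int × Int)) (num_movimientos : Int) : Prop :=
  0 ≤ num_movimientos
instance (posicion : Int × Int) (movimientos : List (Int × Int)) (num_movimientos : Int) : Decidable (Pre_generar_posiciones posicion movimientos num_movimientos) := by unfold Pre_generar_posiciones; infer_instance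
def pvWitness_generar_posiciones : (Int × Int) × (List (Int × Int)) × Int := ((3, 3), [(1, 2), (2, 1)], 2)

def Spec_generar_posiciones (posicion : Int × Int) (movimientos : List (Int × Int)) (num_movimientos : Int) (out : List (Int × Int)) : Prop := out = generar_posiciones_alt posicion movimientos num_movimientos
instance (posicion : Int × Int) (movimientos : List (Int × Int)) (num_movimientos : Int) (out : List (Int × Int)) : Decidable (Spec_generar_posiciones posicion movimientos num_movimientos out) := by unfold Spec_generar_posiciones; infer_instance

-- ===== CLAIM (what is proved, stated in full; the proofs are below) =====
def Claim_equal_generar_posiciones : Prop := ∀ (posicion : Int × Int) (movimientos : List (Int × Int)) (num_movimientos : Int), Dom_generar_posiciones posicion movimientos num_movimientos → Pre_generar_posiciones posicion movimientos num_movimientos → Spec_generar_posiciones posicion movimientos num_movimientos (generar_posiciones posicion movimientos num_movimientos)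

-- ===== LEMMAS AND PROOFS =====
-- children of p at one step, as a flatMap
def pvChildren (movimientos : List (Int × Int)) (p : Int × Int) : List (Int × Int) :=
  movimientos.flatMap (fun m =>
    let nueva : Int × Int := (p.1 + m.1, p.2 + m.2)
    if 0 ≤ nueva.1 ∧ nueva.1 < 8 ∧ 0 ≤ nueva.2 ∧ nueva.2 < 8 then [nueva] else [])

theorem pvFoldlAppendIf {α β : Type} (l : List α) (h : α → List β) (acc : List β) :
    l.foldl (fun a x => a ++ h x) acc = acc ++ l.flatMap h := by
  induction l generalizing acc with
  | nil => simp
  | cons x xs ih => simp [List.foldl, ih, List.append_assoc]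

theorem pvGenA_succ (movimientos : List (Int × Int)) (p : Int × Int) (k : Nat) :
    pvGenA movimientos p (k + 1) = (pvChildren movimientos p).flatMap (fun q => pvGenA movimientos q k) := by
  have : pvGenA movimientos p (k + 1) =
      movimientos.foldl (fun acc m =>
        acc ++ (let nueva : Int × Int := (p.1 + m.1, p.2 + m.2)
          if 0 ≤ nueva.1 ∧ nueva.1 < 8 ∧ 0 ≤ nueva.2 ∧ nueva.2 < 8 then pvGenA movimientos nueva k else [])) [] := by
    simp only [pvGenA]
    congr 1
    funext acc m
    by_cases h : 0 ≤ p.1 + m.1 ∧ p.1 + m.1 < 8 ∧ 0 ≤ p.2 + m.2 ∧ p.2 + m.2 < 8 <;> simp [h]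
  rw [this, pvFoldlAppendIf, pvChildren, List.flatMap_assoc]
  simp only [List.nil_append]
  congr 1
  funext m
  by_cases h : 0 ≤ p.1 + m.1 ∧ p.1 + m.1 < 8 ∧ 0 ≤ p.2 + m.2 ∧ p.2 + m.2 < 8 <;> simp [h]

theorem pvStepB_flatMap (movimientos frontera : List (Int × Int)) :
    pvStepB movimientos frontera = frontera.flatMap (pvChildren movimientos) := by
  have inner : ∀ (p : Int × Int) (acc : List (Int × Int)),
      movimientos.foldl (fun sig m =>
        let nueva : Int × Int := (p.1 + m.1, p.2 + m.2)
        if 0 ≤ nueva.1 ∧ nueva.1 < 8 ∧ 0 ≤ nueva.2 ∧ nueva.2 < 8 then sig ++ [nueva] else sig) acc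
      = acc ++ pvChildren movimientos p := by
    intro p acc
    have : movimientos.foldl (fun sig m =>
        let nueva : Int × Int := (p.1 + m.1, p.2 + m.2)
        if 0 ≤ nueva.1 ∧ nueva.1 < 8 ∧ 0 ≤ nueva.2 ∧ nueva.2 < 8 then sig ++ [nueva] else sig) acc
      = movimientos.foldl (fun sig m =>
          sig ++ (let nueva : Int × Int := (p.1 + m.1, p.2 + m.2)
            if 0 ≤ nueva.1 ∧ nueva.1 < 8 ∧ 0 ≤ nueva.2 ∧ nueva.2 < 8 then [nueva] else [])) acc := by
      congr 1
      funext sig m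
      by_cases h : 0 ≤ p.1 + m.1 ∧ p.1 + m.1 < 8 ∧ 0 ≤ p.2 + m.2 ∧ p.2 + m.2 < 8 <;> simp [h]
    rw [this, pvFoldlAppendIf, pvChildren]
  unfold pvStepB
  have outer : ∀ (l acc : List (Int × Int)),
      l.foldl (fun siguiente p =>
        movimientos.foldl (fun sig m =>
          let nueva : Int × Int := (p.1 + m.1, p.2 + m.2)
          if 0 ≤ nueva.1 ∧ nueva.1 < 8 ∧ 0 ≤ nueva.2 ∧ nueva.2 < 8 then sig ++ [nueva] else sig) siguiente) acc
      = acc ++ l.flatMap (pvChildren movimientos) := by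
    intro l
    induction l with
    | nil => intro acc; simp
    | cons x xs ih => intro acc; rw [List.foldl_cons, inner, ih]; simp [List.append_assoc]
  simpa using outer frontera []

theorem pvLoopEqGen (movimientos : List (Int × Int)) (k : Nat) (L : List (Int × Int)) :
    pvLoopB movimientos L k = L.flatMap (fun p => pvGenA movimientos p k) := by
  induction k generalizing L with
  | zero => simp [pvLoopB, pvGenA]
  | succ n ih =>
    by_cases hL : L = []
    · simp [pvLoopB, hL]
    · rw [pvLoopB, if_neg hL, ih, pvStepB_flatMap, List.flatMap_assoc]
      congr 1
      funext p
      rw [pvGenA_succ]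

-- ===== VERDICT (by name: the statement is the Claim_ definition above) =====
theorem generar_posiciones_spec : Claim_equal_generar_posiciones := by
  intro posicion movimientos num_movimientos _ hpre
  unfold Pre_generar_posiciones at hpre
  unfold Spec_generar_posiciones generar_posiciones generar_posiciones_alt
  rw [pvLoopEqGen]
  by_cases h0 : num_movimientos = 0
  · simp [h0, pvGenA]
  · have : num_movimientos.toNat ≠ 0 := by
      intro h; exact h0 (by omega)
    simp [h0]
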